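-- pv_equiv track=rewrite | github.com/talavis/advent-of-code | 2023/14.py | calc
-- ===== SOURCE A (Python) =====
-- def calc(data):
--     for i in range(len(data)):
--         for j in range(len(data[0])):
--             if data[i][j] == "O":
--                 h = i
--                 while h > 0 and data[h - 1][j] == ".":
--                     h -= 1
--                 data[i][j] = "."
--                 data[h][j] = "O"
--
--     score = 0
--     for i, row in enumerate(data):
--         for c in row:
--             if c == "O":
--                 score += len(data) - i
--
--     return score
-- ===== SOURCE B (Python) =====
-- def calc(data):
--     n = len(data)
--     width = len(data[0]) if data else 0
--     score = 0
--     for j in range(width):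
--         free = 0
--         for i, row in enumerate(data):
--             c = row[j]
--             if c == "O":
--                 score += n - free
--                 free += 1
--             elif c != ".":
--                 free = i + 1
--     return score
-- ===== Notes on version B (the rewrite author's own statement) =====
-- stated objective: alternative
-- what changed: Replaces the grid-mutating per-rock upward while-loop scan with a per-column next-free-row pointer pass that accumulates the weighted load directly without materialising the rolled grid.
-- intended difference: On ragged grids where some row extends past row 0's width and carries an 'O' in that overhang, A adds len(data)-i for rocks its rolling phase never touched (it only rolls columns of row 0), while B scores only the width-len(data[0]) grid; treating the grid as rectangular throughout is the intended behaviour. — e.g. on calc([["."], [".", "O"]]): A returns 1, B returns 0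
import Mathlib
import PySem

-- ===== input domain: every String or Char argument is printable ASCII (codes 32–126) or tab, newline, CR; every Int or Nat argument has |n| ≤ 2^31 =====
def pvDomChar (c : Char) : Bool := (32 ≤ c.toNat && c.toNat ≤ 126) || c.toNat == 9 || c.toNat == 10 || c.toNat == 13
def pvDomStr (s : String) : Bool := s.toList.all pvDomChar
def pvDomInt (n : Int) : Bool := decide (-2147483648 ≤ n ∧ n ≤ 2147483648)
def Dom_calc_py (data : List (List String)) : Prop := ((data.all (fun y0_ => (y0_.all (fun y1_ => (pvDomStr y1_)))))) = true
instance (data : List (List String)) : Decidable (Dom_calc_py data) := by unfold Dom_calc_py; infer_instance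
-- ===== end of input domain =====

-- B replaces A's grid-mutating per-rock upward while-scan by a per-column next-free-row pointer
-- pass that accumulates the score without materialising the rolled grid.  A mutates its argument
-- in place (B does not); the equivalence proved here is about the RETURN value only.

-- ===== PORT A =====
-- while h > 0 and data[h-1][j] == ".": h -= 1   (started at h = i; returns the final h)
def pvFindH (g : List (List String)) (j : Nat) : Nat → Nat
  | 0 => 0
  | h + 1 => if (g.getD h []).getD j "" = "." then pvFindH g j h else h + 1

-- data[i][j] = v
def pvSet (g : List (List String)) (i j : Nat) (v : String) : List (List String) :=
  g.set i ((g.getD i []).set j v)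

-- body of the inner 'for j' loop at row i
def pvStepA (i : Nat) (g : List (List String)) (j : Nat) : List (List String) :=
  if (g.getD i []).getD j "" = "O" then
    pvSet (pvSet g i j ".") (pvFindH g j i) j "O"
  else g

-- the first double loop: rolls every rock north, mutating the grid
def pvRollA (data : List (List String)) : List (List String) :=
  (List.range data.length).foldl
    (fun g i => (List.range g.headI.length).foldl (pvStepA i) g) data

def calc_py (data : List (List String)) : Int :=
  let g := pvRollA data
  (PySem.List.enumerate g).foldl
    (fun score p =>
      p.2.foldl (fun score c => if c = "O" then score + ((g.length : Int) - p.1) else score) score)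
    0

-- ===== PORT B =====
-- row[j] is ported as getD (exact under Pre_, where j < width ≤ every row's length);
-- headI.length is exactly 'len(data[0]) if data else 0'.
def calc_py_alt (data : List (List String)) : Int :=
  let n := data.length
  let w := data.headI.length
  (List.range w).foldl
    (fun score j =>
      ((PySem.List.enumerate data).foldl
        (fun (p : Int × Int) ri =>
          let c := ri.2.getD j ""
          if c = "O" then (p.1 + ((n : Int) - p.2), p.2 + 1)
          else if c = "." then p
          else (p.1, ri.1 + 1))
        (score, 0)).1)
    0

-- ===== PRECONDITION & SPEC =====
-- A indexes every row at the columns 0..len(data[0])-1, so it raises IndexError (as does B)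
-- exactly when some row is shorter than row 0; Pre_ excludes exactly those inputs.
def Pre_calc_py (data : List (List String)) : Prop :=
  ∀ row ∈ data, data.headI.length ≤ row.length
instance (data : List (List String)) : Decidable (Pre_calc_py data) := by
  unfold Pre_calc_py; infer_instance

def pvWitness_calc_py : List (List String) := [["O", ".", "#"], [".", "O", "."], ["#", ".", "O"]]

-- On ragged grids where some row extends past row 0's width and carries an "O" in the overhang,
-- A adds len(data)-i for rocks its rolling phase never touched (it rolls only columns of row 0),
-- while B scores only the width-len(data[0]) grid; treating the grid as rectangular throughout is
-- the intended behaviour.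
def D_calc_py (data : List (List String)) : Prop :=
  ∃ row ∈ data, "O" ∈ row.drop data.headI.length
instance (data : List (List String)) : Decidable (D_calc_py data) := by
  unfold D_calc_py; infer_instance

def Spec_calc_py (data : List (List String)) (out : Int) : Prop :=
  ¬ D_calc_py data → out = calc_py_alt data
instance (data : List (List String)) (out : Int) : Decidable (Spec_calc_py data out) := by
  unfold Spec_calc_py; infer_instance

def pvDiffWitness_calc_py : List (List String) := [["."], [".", "O"]]
def pvDiffWitnessOut_calc_py : Int × Int := (1, 0)

-- ===== CLAIM (what is proved, stated in full; the proofs are below) =====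
def Claim_unchanged_calc_py : Prop :=
  ∀ (data : List (List String)), Dom_calc_py data → Pre_calc_py data →
    Spec_calc_py data (calc_py data)
def Claim_changed_calc_py : Prop :=
  Dom_calc_py (pvDiffWitness_calc_py) ∧ Pre_calc_py (pvDiffWitness_calc_py) ∧
  D_calc_py (pvDiffWitness_calc_py) ∧
  calc_py (pvDiffWitness_calc_py) = pvDiffWitnessOut_calc_py.1 ∧
  calc_py_alt (pvDiffWitness_calc_py) = pvDiffWitnessOut_calc_py.2 ∧
  pvDiffWitnessOut_calc_py.1 ≠ pvDiffWitnessOut_calc_py.2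
def Claim_exact_calc_py : Prop :=
  ∀ (data : List (List String)), Dom_calc_py data → Pre_calc_py data →
    D_calc_py data → calc_py data ≠ calc_py_alt data

-- ===== LEMMAS AND PROOFS =====

-- cell (r,c) of a grid, "" when out of range
def pvCell (g : List (List String)) (r c : Nat) : String := (g.getD r []).getD c ""

-- column j of a grid
def pvCol (data : List (List String)) (j : Nat) : List String :=
  data.map (fun row => row.getD j "")

-- one settling step: state = (settled column prefix, next free row)
def pvSStep (p : List String × Nat) (c : String) : List String × Nat :=
  if c = "O" then ((p.1 ++ ["."]).set p.2 "O", p.2 + 1)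
  else if c = "." then (p.1 ++ ["."], p.2)
  else (p.1 ++ [c], p.1.length + 1)

def pvSettle (u : List String) : List String × Nat := u.foldl pvSStep ([], 0)

-- score of one settled column of a grid with n rows
def pvColScore (n : Nat) (S : List String) : Int :=
  ∑ q ∈ Finset.range S.length, (if S.getD q "" = "O" then (n : Int) - q else 0)

-- the overhang part of A's score: rocks beyond row 0's width
def pvTail (data : List (List String)) : Int :=
  ∑ r ∈ Finset.range data.length,
    ∑ q ∈ Finset.range ((data.getD r []).drop data.headI.length).length,
      (if ((data.getD r []).drop data.headI.length).getD q "" = "O"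
        then (data.length : Int) - r else 0)

theorem calc_py_settle_append (u : List String) (c : String) :
    pvSettle (u ++ [c]) = pvSStep (pvSettle u) c := by
  simp [pvSettle, List.foldl_append]

theorem calc_py_sstep_O (p : List String × Nat) :
    pvSStep p "O" = ((p.1 ++ ["."]).set p.2 "O", p.2 + 1) := by
  simp [pvSStep]

theorem calc_py_sstep_dot (p : List String × Nat) :
    pvSStep p "." = (p.1 ++ ["."], p.2) := by
  simp [pvSStep]

theorem calc_py_sstep_other (p : List String × Nat) (c : String)
    (h1 : c ≠ "O") (h2 : c ≠ ".") :
    pvSStep p c = (p.1 ++ [c], p.1.length + 1) := by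
  simp [pvSStep, h1, h2]

theorem calc_py_sstep_fst (p : List String × Nat) (c : String) (hc : c ≠ "O") :
    (pvSStep p c).1 = p.1 ++ [c] := by
  by_cases h : c = "."
  · subst h; rw [calc_py_sstep_dot]
  · rw [calc_py_sstep_other p c hc h]

theorem calc_py_settle_len (u : List String) : (pvSettle u).1.length = u.length := by
  induction u using List.reverseRecOn with
  | nil => rfl
  | append_singleton u c ih =>
    rw [calc_py_settle_append]
    by_cases hO : c = "O"
    · subst hO; rw [calc_py_sstep_O]; simp [ih]
    · rw [calc_py_sstep_fst _ _ hO]; simp [ih]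

def pvSInv (p : List String × Nat) : Prop :=
  p.2 ≤ p.1.length ∧
  (∀ q, p.2 ≤ q → q < p.1.length → p.1.getD q "" = ".") ∧
  (p.2 = 0 ∨ p.1.getD (p.2 - 1) "" ≠ ".")

theorem calc_py_sstep_inv (p : List String × Nat) (c : String) (h : pvSInv p) :
    pvSInv (pvSStep p c) := by
  obtain ⟨hle, hgap, hstop⟩ := h
  by_cases hO : c = "O"
  · subst hO
    rw [calc_py_sstep_O]
    refine ⟨by simp; omega, ?_, ?_⟩
    · intro q hq hq'
      simp only [List.length_set, List.length_append, List.length_cons, List.length_nil] at hq'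
      have hne : p.2 ≠ q := by omega
      rw [List.getD_eq_getElem?_getD, List.getElem?_set_ne hne]
      by_cases hql : q < p.1.length
      · rw [List.getElem?_append_left hql, ← List.getD_eq_getElem?_getD]
        exact hgap q (by omega) hql
      · rw [List.getElem?_append_right (by omega)]
        have : q - p.1.length = 0 := by omega
        simp [this]
    · right
      have h1 : p.2 + 1 - 1 = p.2 := by omega
      rw [h1, List.getD_eq_getElem?_getD, List.getElem?_set_self (by simp; omega)]
      simp
  · by_cases hD : c = "."
    · subst hD
      rw [calc_py_sstep_dot]
      refine ⟨by simp; omega, ?_, ?_⟩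
      · intro q hq hq'
        simp only [List.length_append, List.length_cons, List.length_nil] at hq'
        by_cases hql : q < p.1.length
        · rw [List.getD_eq_getElem?_getD, List.getElem?_append_left hql,
            ← List.getD_eq_getElem?_getD]
          exact hgap q hq hql
        · rw [List.getD_eq_getElem?_getD, List.getElem?_append_right (by omega)]
          have : q - p.1.length = 0 := by omega
          simp [this]
      · by_cases h0 : p.2 = 0
        · exact Or.inl h0
        · right
          rw [List.getD_eq_getElem?_getD, List.getElem?_append_left (by omega),
            ← List.getD_eq_getElem?_getD]
          exact hstop.resolve_left h0
    · rw [calc_py_sstep_other p c hO hD]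
      refine ⟨by simp, ?_, ?_⟩
      · intro q hq hq'
        simp only [List.length_append, List.length_cons, List.length_nil] at hq'
        omega
      · right
        have h1 : p.1.length + 1 - 1 = p.1.length := by omega
        rw [h1, List.getD_eq_getElem?_getD,
          List.getElem?_append_right (Nat.le_refl _)]
        simpa using hD

theorem calc_py_settle_inv (u : List String) : pvSInv (pvSettle u) := by
  induction u using List.reverseRecOn with
  | nil => exact ⟨by simp [pvSettle], by intro q _ h; simp [pvSettle] at h, Or.inl rfl⟩
  | append_singleton u c ih =>
    rw [calc_py_settle_append]; exact calc_py_sstep_inv _ _ ih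

theorem calc_py_colScore_snoc (n : Nat) (S : List String) (c : String) (hc : c ≠ "O") :
    pvColScore n (S ++ [c]) = pvColScore n S := by
  unfold pvColScore
  simp only [List.length_append, List.length_cons, List.length_nil]
  rw [Finset.sum_range_succ]
  have hlast : (S ++ [c]).getD S.length "" = c := by
    rw [List.getD_eq_getElem?_getD, List.getElem?_append_right (Nat.le_refl _)]
    simp
  rw [hlast, if_neg hc, add_zero]
  apply Finset.sum_congr rfl
  intro q hq
  rw [Finset.mem_range] at hq
  rw [List.getD_eq_getElem?_getD, List.getElem?_append_left hq, ← List.getD_eq_getElem?_getD]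

theorem calc_py_colScore_set (n : Nat) (S : List String) (f : Nat)
    (hf : f ≤ S.length) (hgap : f < S.length → S.getD f "" = ".") :
    pvColScore n ((S ++ ["."]).set f "O") = pvColScore n S + ((n : Int) - f) := by
  unfold pvColScore
  simp only [List.length_set, List.length_append, List.length_cons, List.length_nil]
  have hpoint : ∀ q ∈ Finset.range (S.length + 1),
      (if ((S ++ ["."]).set f "O").getD q "" = "O" then (n : Int) - q else 0)
      = (if (S ++ ["."]).getD q "" = "O" then (n : Int) - q else 0)
        + (if q = f then (n : Int) - f else 0) := by
    intro q hq
    rw [Finset.mem_range] at hq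
    by_cases hqf : q = f
    · subst hqf
      have h1 : ((S ++ ["."]).set q "O").getD q "" = "O" := by
        rw [List.getD_eq_getElem?_getD, List.getElem?_set_self (by simp; omega)]; simp
      have h2 : (S ++ ["."]).getD q "" = "." := by
        by_cases hql : q < S.length
        · rw [List.getD_eq_getElem?_getD, List.getElem?_append_left hql,
            ← List.getD_eq_getElem?_getD]
          exact hgap hql
        · rw [List.getD_eq_getElem?_getD, List.getElem?_append_right (by omega)]
          have : q - S.length = 0 := by omega
          simp [this]
      rw [h1, h2]
      simp
    · have h1 : ((S ++ ["."]).set f "O").getD q "" = (S ++ ["."]).getD q "" := by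
        rw [List.getD_eq_getElem?_getD, List.getElem?_set_ne (fun h => hqf h.symm),
          ← List.getD_eq_getElem?_getD]
      rw [h1, if_neg hqf, add_zero]
  rw [Finset.sum_congr rfl hpoint, Finset.sum_add_distrib,
    Finset.sum_ite_eq' (Finset.range (S.length + 1)) f (fun _ => (n : Int) - f),
    if_pos (Finset.mem_range.mpr (by omega))]
  congr 1
  have : pvColScore n (S ++ ["."]) = pvColScore n S := calc_py_colScore_snoc n S "." (by decide)
  unfold pvColScore at this
  simpa using this

-- B's per-column scan over one column computes the settled column's score and free pointer
theorem calc_py_bcol (n : Nat) (u : List String) (s : Int) :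
    (PySem.List.enumerate u).foldl
      (fun (p : Int × Int) (ri : Int × String) =>
        if ri.2 = "O" then (p.1 + ((n : Int) - p.2), p.2 + 1)
        else if ri.2 = "." then p else (p.1, ri.1 + 1)) (s, 0)
    = (s + pvColScore n (pvSettle u).1, ((pvSettle u).2 : Int)) := by
  induction u using List.reverseRecOn with
  | nil => simp [pvSettle, pvColScore, PySem.List.enumerate_nil]
  | append_singleton u c ih =>
    rw [PySem.List.enumerate_append, List.foldl_append, ih]
    have hinv := calc_py_settle_inv u
    obtain ⟨hle, hgap, _⟩ := hinv
    have hlen := calc_py_settle_len u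
    rw [calc_py_settle_append]
    simp only [PySem.List.enumerate_cons, PySem.List.enumerate_nil,
      List.foldl_cons, List.foldl_nil]
    by_cases hO : c = "O"
    · subst hO
      rw [calc_py_sstep_O, if_pos rfl,
        calc_py_colScore_set n (pvSettle u).1 (pvSettle u).2 hle
          (fun h => hgap _ (Nat.le_refl _) h)]
      simp only [Prod.mk.injEq]
      constructor
      · ring
      · push_cast; ring
    · by_cases hD : c = "."
      · subst hD
        rw [calc_py_sstep_dot, if_neg (by decide), if_pos rfl,
          calc_py_colScore_snoc n (pvSettle u).1 "." (by decide)]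
      · rw [calc_py_sstep_other _ c hO hD, if_neg hO, if_neg hD,
          calc_py_colScore_snoc n (pvSettle u).1 c hO]
        simp only [Prod.mk.injEq, true_and]
        push_cast [hlen]
        ring

-- a score row-loop is a sum over the row's indices
theorem calc_py_row_sum (row : List String) (v s : Int) :
    row.foldl (fun s c => if c = "O" then s + v else s) s
    = s + ∑ q ∈ Finset.range row.length, (if row.getD q "" = "O" then v else 0) := by
  induction row using List.reverseRecOn generalizing s with
  | nil => simp
  | append_singleton row c ih =>
    rw [List.foldl_append, ih]
    simp only [List.foldl_cons, List.foldl_nil, List.length_append, List.length_cons,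
      List.length_nil]
    rw [Finset.sum_range_succ]
    have hlast : (row ++ [c]).getD row.length "" = c := by
      rw [List.getD_eq_getElem?_getD, List.getElem?_append_right (Nat.le_refl _)]; simp
    have hrest : ∀ q ∈ Finset.range row.length,
        (if (row ++ [c]).getD q "" = "O" then v else 0)
        = (if row.getD q "" = "O" then v else 0) := by
      intro q hq
      rw [Finset.mem_range] at hq
      rw [List.getD_eq_getElem?_getD, List.getElem?_append_left hq,
        ← List.getD_eq_getElem?_getD]
    rw [Finset.sum_congr rfl hrest, hlast]
    by_cases hc : c = "O"
    · rw [if_pos hc, if_pos hc]; ring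
    · rw [if_neg hc, if_neg hc]; ring

-- the enumerate-over-rows score loop is a double sum
theorem calc_py_enum_score (G : List String → List String) (F : Int → Int)
    (l : List (List String)) (a : Int) :
    (PySem.List.enumerate l).foldl
      (fun s p => (G p.2).foldl (fun s c => if c = "O" then s + F p.1 else s) s) a
    = a + ∑ r ∈ Finset.range l.length,
        ∑ q ∈ Finset.range (G (l.getD r [])).length,
          (if (G (l.getD r [])).getD q "" = "O" then F r else 0) := by
  induction l using List.reverseRecOn generalizing a with
  | nil => simp [PySem.List.enumerate_nil]
  | append_singleton l row ih =>
    rw [PySem.List.enumerate_append, List.foldl_append, ih]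
    simp only [PySem.List.enumerate_cons, PySem.List.enumerate_nil,
      List.foldl_cons, List.foldl_nil, List.length_append, List.length_cons, List.length_nil]
    rw [calc_py_row_sum, Finset.sum_range_succ]
    have hlast : (l ++ [row]).getD l.length [] = row := by
      rw [List.getD_eq_getElem?_getD, List.getElem?_append_right (Nat.le_refl _)]; simp
    have hrest : ∀ r ∈ Finset.range l.length,
        (∑ q ∈ Finset.range (G ((l ++ [row]).getD r [])).length,
          (if (G ((l ++ [row]).getD r [])).getD q "" = "O" then F r else 0))
        = ∑ q ∈ Finset.range (G (l.getD r [])).length,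
          (if (G (l.getD r [])).getD q "" = "O" then F r else 0) := by
      intro r hr
      rw [Finset.mem_range] at hr
      rw [List.getD_eq_getElem?_getD, List.getElem?_append_left hr,
        ← List.getD_eq_getElem?_getD]
    rw [Finset.sum_congr rfl hrest, hlast]
    ring_nf

-- enumerate over a mapped list
theorem calc_py_enum_map {α β : Type} (f : α → β) (l : List α) (s : Int) :
    PySem.List.enumerate (l.map f) s = (PySem.List.enumerate l s).map (fun p => (p.1, f p.2)) := by
  induction l generalizing s with
  | nil => simp [PySem.List.enumerate_nil]
  | cons x t ih => simp [PySem.List.enumerate_cons, ih]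

-- the while loop: scanning up from i through dots stops exactly at the free pointer
theorem calc_py_findH (g : List (List String)) (j f : Nat)
    (hstop : f = 0 ∨ pvCell g (f - 1) j ≠ ".") :
    ∀ i, f ≤ i → (∀ r, f ≤ r → r < i → pvCell g r j = ".") → pvFindH g j i = f := by
  intro i
  induction i with
  | zero => intro h _; interval_cases f; rfl
  | succ h ih =>
    intro hf hgap
    by_cases hfh : f = h + 1
    · have hne : pvCell g h j ≠ "." := by
        have := hstop.resolve_left (by omega)
        simpa [hfh] using this
      unfold pvFindH
      rw [if_neg (by simpa [pvCell] using hne)]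
      omega
    · have hdot : pvCell g h j = "." := hgap h (by omega) (by omega)
      unfold pvFindH
      rw [if_pos (by simpa [pvCell] using hdot)]
      exact ih (by omega) (fun r hr hr' => hgap r hr (by omega))

theorem calc_py_pvSet_length (g : List (List String)) (i j : Nat) (v : String) :
    (pvSet g i j v).length = g.length := by simp [pvSet]

theorem calc_py_pvSet_rowlen (g : List (List String)) (i j : Nat) (v : String) (r : Nat) :
    ((pvSet g i j v).getD r []).length = (g.getD r []).length := by
  unfold pvSet
  rw [List.getD_eq_getElem?_getD, List.getElem?_set]
  by_cases hir : i = r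
  · subst hir
    by_cases hl : i < g.length
    · simp [hl, List.getD_eq_getElem?_getD]
    · simp [hl]
  · rw [if_neg hir, ← List.getD_eq_getElem?_getD]

theorem calc_py_pvSet_cell (g : List (List String)) (a b : Nat) (v : String) (r c : Nat)
    (ha : a < g.length) (hb : b < (g.getD a []).length) :
    pvCell (pvSet g a b v) r c = if r = a ∧ c = b then v else pvCell g r c := by
  unfold pvCell pvSet
  by_cases hra : r = a
  · subst hra
    rw [List.getD_eq_getElem?_getD (l := g.set r _), List.getElem?_set_self (by simpa using ha)]
    simp only [Option.getD_some]
    by_cases hcb : c = b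
    · subst hcb
      rw [List.getD_eq_getElem?_getD, List.getElem?_set_self (by simpa using hb)]
      simp
    · rw [List.getD_eq_getElem?_getD, List.getElem?_set_ne (fun h => hcb h.symm),
        ← List.getD_eq_getElem?_getD]
      simp [hcb]
  · rw [List.getD_eq_getElem?_getD (l := g.set a _), List.getElem?_set_ne (fun h => hra h.symm),
      ← List.getD_eq_getElem?_getD]
    simp [hra]

-- generic invariant for a foldl over List.range
theorem calc_py_range_inv {γ : Type} (P : Nat → γ → Prop) (f : γ → Nat → γ) (k : Nat) (init : γ)
    (h0 : P 0 init) (hs : ∀ j, j < k → ∀ g, P j g → P (j + 1) (f g j)) :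
    P k ((List.range k).foldl f init) := by
  induction k with
  | zero => simpa using h0
  | succ k ih =>
    rw [List.range_succ, List.foldl_append]
    exact hs k (by omega) _ (ih (fun j hj g hg => hs j (by omega) g hg))

theorem calc_py_headI_len (l : List (List String)) : l.headI.length = (l.getD 0 []).length := by
  cases l <;> rfl

-- grid invariant: after processing rows < i fully and, in row i, columns < j
def pvQ (data : List (List String)) (i j : Nat) (g : List (List String)) : Prop :=
  g.length = data.length ∧
  (∀ r, ((g.getD r []).length) = ((data.getD r []).length)) ∧
  (∀ r c, pvCell g r c =
    if c < data.headI.length ∧ r ≤ i ∧ (c < j ∨ r < i) then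
      (pvSettle ((pvCol data c).take (if c < j then i + 1 else i))).1.getD r ""
    else pvCell data r c)

theorem calc_py_take_succ_col (data : List (List String)) (c i : Nat) (hi : i < data.length) :
    (pvCol data c).take (i + 1) = (pvCol data c).take i ++ [pvCell data i c] := by
  rw [List.take_add_one]
  congr 1
  unfold pvCol pvCell
  rw [List.getElem?_map, List.getElem?_eq_getElem (by simpa using hi)]
  simp [List.getD_eq_getElem?_getD, List.getElem?_eq_getElem hi]

theorem calc_py_Q_inner (data : List (List String)) (hPre : Pre_calc_py data)
    (i j : Nat) (hi : i < data.length) (hj : j < data.headI.length)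
    (g : List (List String)) (hQ : pvQ data i j g) :
    pvQ data i (j + 1) (pvStepA i g j) := by
  obtain ⟨hlen, hrow, hcellQ⟩ := hQ
  have hwr : ∀ r, r < data.length → data.headI.length ≤ (data.getD r []).length := by
    intro r hr
    apply hPre
    rw [List.getD_eq_getElem?_getD, List.getElem?_eq_getElem hr]
    exact List.getElem_mem hr
  have htake_len : ((pvCol data j).take i).length = i := by
    simp [pvCol]; omega
  have hSlen : (pvSettle ((pvCol data j).take i)).1.length = i := by
    rw [calc_py_settle_len, htake_len]
  have hcell0 : pvCell g i j = pvCell data i j := by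
    rw [hcellQ i j, if_neg (by omega)]
  have hext : pvSettle ((pvCol data j).take (i + 1))
      = pvSStep (pvSettle ((pvCol data j).take i)) (pvCell data i j) := by
    rw [calc_py_take_succ_col data j i hi, calc_py_settle_append]
  by_cases hO : pvCell data i j = "O"
  case neg =>
    have hstep : pvStepA i g j = g := by
      unfold pvStepA
      have h0 : (g.getD i []).getD j "" = pvCell data i j := hcell0
      rw [h0, if_neg hO]
    rw [hstep]
    refine ⟨hlen, hrow, ?_⟩
    intro r c
    by_cases hcj : c = j
    · rw [hcj]
      by_cases hri : r ≤ i
      · rw [if_pos (show j < data.headI.length ∧ r ≤ i ∧ (j < j + 1 ∨ r < i) from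
            ⟨hj, hri, Or.inl (by omega)⟩),
          if_pos (show j < j + 1 by omega), hext, calc_py_sstep_fst _ _ hO]
        by_cases hri' : r < i
        · rw [List.getD_eq_getElem?_getD, List.getElem?_append_left (by omega),
            ← List.getD_eq_getElem?_getD]
          have h1 := hcellQ r j
          rw [if_pos (show j < data.headI.length ∧ r ≤ i ∧ (j < j ∨ r < i) from
              ⟨hj, hri, Or.inr hri'⟩),
            if_neg (show ¬ j < j by omega)] at h1
          exact h1
        · have hrieq : r = i := by omega
          subst hrieq
          rw [List.getD_eq_getElem?_getD, List.getElem?_append_right (by omega)]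
          have h0 : r - (pvSettle ((pvCol data j).take r)).1.length = 0 := by omega
          rw [h0]
          simpa using hcell0
      · rw [if_neg (by omega)]
        have h1 := hcellQ r j
        rw [if_neg (by omega)] at h1
        exact h1
    · have hpe : (c < j + 1) = (c < j) := propext (by omega)
      rw [hcellQ r c]
      simp only [hpe]
  case pos =>
    have hinv := calc_py_settle_inv ((pvCol data j).take i)
    obtain ⟨hle, hgap, hstop⟩ := hinv
    have hfle : (pvSettle ((pvCol data j).take i)).2 ≤ i := by omega
    have hstep : pvStepA i g j
        = pvSet (pvSet g i j ".") (pvFindH g j i) j "O" := by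
      unfold pvStepA
      have h0 : (g.getD i []).getD j "" = pvCell data i j := hcell0
      rw [h0, if_pos hO]
    have hfind : pvFindH g j i = (pvSettle ((pvCol data j).take i)).2 := by
      apply calc_py_findH
      · by_cases h0 : (pvSettle ((pvCol data j).take i)).2 = 0
        · exact Or.inl h0
        · right
          have hne := hstop.resolve_left h0
          have hf1 : (pvSettle ((pvCol data j).take i)).2 - 1 < i := by omega
          have h1 := hcellQ ((pvSettle ((pvCol data j).take i)).2 - 1) j
          rw [if_pos (show j < data.headI.length ∧
                (pvSettle ((pvCol data j).take i)).2 - 1 ≤ i ∧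
                (j < j ∨ (pvSettle ((pvCol data j).take i)).2 - 1 < i) from
              ⟨hj, by omega, Or.inr hf1⟩),
            if_neg (show ¬ j < j by omega)] at h1
          rw [h1]
          exact hne
      · exact hfle
      · intro r hr hr'
        have h1 := hcellQ r j
        rw [if_pos (show j < data.headI.length ∧ r ≤ i ∧ (j < j ∨ r < i) from
            ⟨hj, by omega, Or.inr hr'⟩),
          if_neg (show ¬ j < j by omega)] at h1
        rw [h1]
        exact hgap r hr (by omega)
    rw [hstep, hfind]
    have ha1 : i < g.length := by omega
    have hb1 : j < (g.getD i []).length := by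
      rw [hrow i]; exact lt_of_lt_of_le hj (hwr i hi)
    have ha2 : (pvSettle ((pvCol data j).take i)).2 < (pvSet g i j ".").length := by
      rw [calc_py_pvSet_length]; omega
    have hb2 : j < ((pvSet g i j ".").getD (pvSettle ((pvCol data j).take i)).2 []).length := by
      rw [calc_py_pvSet_rowlen, hrow]
      exact lt_of_lt_of_le hj (hwr _ (by omega))
    have hcellg' : ∀ r c,
        pvCell (pvSet (pvSet g i j ".") (pvSettle ((pvCol data j).take i)).2 j "O") r c
        = if r = (pvSettle ((pvCol data j).take i)).2 ∧ c = j then "O"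
          else if r = i ∧ c = j then "." else pvCell g r c := by
      intro r c
      rw [calc_py_pvSet_cell _ _ j "O" r c ha2 hb2,
        calc_py_pvSet_cell g i j "." r c ha1 hb1]
    have hS' : (pvSettle ((pvCol data j).take (i + 1))).1
        = ((pvSettle ((pvCol data j).take i)).1 ++ ["."]).set
            (pvSettle ((pvCol data j).take i)).2 "O" := by
      rw [hext, hO, calc_py_sstep_O]
    refine ⟨by rw [calc_py_pvSet_length, calc_py_pvSet_length]; exact hlen, ?_, ?_⟩
    · intro r
      rw [calc_py_pvSet_rowlen, calc_py_pvSet_rowlen]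
      exact hrow r
    · intro r c
      rw [hcellg' r c]
      by_cases hcj : c = j
      · rw [hcj]
        by_cases hri : r ≤ i
        · rw [if_pos (show j < data.headI.length ∧ r ≤ i ∧ (j < j + 1 ∨ r < i) from
              ⟨hj, hri, Or.inl (by omega)⟩),
            if_pos (show j < j + 1 by omega), hS']
          by_cases hrf : r = (pvSettle ((pvCol data j).take i)).2
          · rw [if_pos (show r = (pvSettle ((pvCol data j).take i)).2 ∧ j = j from
                ⟨hrf, rfl⟩),
              hrf, List.getD_eq_getElem?_getD,
              List.getElem?_set_self (by simp only [List.length_append,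
                List.length_cons, List.length_nil, hSlen]; omega)]
            simp
          · rw [if_neg (show ¬ (r = (pvSettle ((pvCol data j).take i)).2 ∧ j = j) from
                fun h => hrf h.1),
              List.getD_eq_getElem?_getD, List.getElem?_set_ne (fun h => hrf h.symm)]
            by_cases hri' : r < i
            · rw [if_neg (show ¬ (r = i ∧ j = j) from fun h => by omega),
                List.getElem?_append_left (by omega), ← List.getD_eq_getElem?_getD]
              have h1 := hcellQ r j
              rw [if_pos (show j < data.headI.length ∧ r ≤ i ∧ (j < j ∨ r < i) from
                  ⟨hj, hri, Or.inr hri'⟩),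
                if_neg (show ¬ j < j by omega)] at h1
              exact h1
            · have hrieq : r = i := by omega
              rw [if_pos (show r = i ∧ j = j from ⟨hrieq, rfl⟩),
                List.getElem?_append_right (by omega)]
              have h0 : r - (pvSettle ((pvCol data j).take i)).1.length = 0 := by omega
              rw [h0]
              simp
        · rw [if_neg (show ¬ (r = (pvSettle ((pvCol data j).take i)).2 ∧ j = j) from
              fun h => by omega),
            if_neg (show ¬ (r = i ∧ j = j) from fun h => by omega),
            if_neg (show ¬ (j < data.headI.length ∧ r ≤ i ∧ (j < j + 1 ∨ r < i)) by omega)]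
          have h1 := hcellQ r j
          rw [if_neg (by omega)] at h1
          exact h1
      · rw [if_neg (show ¬ (r = (pvSettle ((pvCol data j).take i)).2 ∧ c = j) from
            fun h => hcj h.2),
          if_neg (show ¬ (r = i ∧ c = j) from fun h => hcj h.2),
          hcellQ r c]
        have hpe : (c < j + 1) = (c < j) := propext (by omega)
        simp only [hpe]

theorem calc_py_Q_init (data : List (List String)) : pvQ data 0 0 data := by
  refine ⟨rfl, fun r => rfl, ?_⟩
  intro r c
  rw [if_neg (by omega)]

theorem calc_py_Q_shift (data : List (List String)) (i : Nat) (g : List (List String))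
    (hQ : pvQ data i data.headI.length g) : pvQ data (i + 1) 0 g := by
  obtain ⟨hlen, hrow, hcellQ⟩ := hQ
  refine ⟨hlen, hrow, ?_⟩
  intro r c
  rw [hcellQ r c]
  by_cases hc : c < data.headI.length
  · by_cases hri : r ≤ i
    · rw [if_pos ⟨hc, hri, Or.inl hc⟩, if_pos hc, if_pos ⟨hc, by omega, Or.inr (by omega)⟩,
        if_neg (by omega)]
    · rw [if_neg (by omega), if_neg (by omega)]
  · rw [if_neg (by omega), if_neg (by omega)]

theorem calc_py_Q_roll (data : List (List String)) (hPre : Pre_calc_py data) :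
    pvQ data data.length 0 (pvRollA data) := by
  unfold pvRollA
  apply calc_py_range_inv (fun i g => pvQ data i 0 g)
  · exact calc_py_Q_init data
  · intro i hiN g hQi
    have hhead : g.headI.length = data.headI.length := by
      rw [calc_py_headI_len, calc_py_headI_len, hQi.2.1 0]
    rw [hhead]
    apply calc_py_Q_shift
    apply calc_py_range_inv (fun j g' => pvQ data i j g') (pvStepA i)
    · exact hQi
    · intro j hj g' hQj
      exact calc_py_Q_inner data hPre i j hiN hj g' hQj

theorem calc_py_sum_map_range (f : Nat → Int) (k : Nat) :
    (((List.range k).map f)).sum = ∑ q ∈ Finset.range k, f q := by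
  induction k with
  | zero => simp
  | succ k ih => rw [List.range_succ, List.map_append, List.sum_append, Finset.sum_range_succ, ih]; simp

theorem calc_py_pre_rows (data : List (List String)) (hPre : Pre_calc_py data) :
    ∀ r, r < data.length → data.headI.length ≤ (data.getD r []).length := by
  intro r hr
  apply hPre
  rw [List.getD_eq_getElem?_getD, List.getElem?_eq_getElem hr]
  exact List.getElem_mem hr

-- A's score loop as a double sum over the final grid
theorem calc_py_scoreA (l : List (List String)) (a : Int) :
    (PySem.List.enumerate l).foldl
      (fun score p =>
        p.2.foldl (fun score c => if c = "O" then score + ((l.length : Int) - p.1) else score)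
          score) a
    = a + ∑ r ∈ Finset.range l.length,
        ∑ q ∈ Finset.range ((l.getD r []).length),
          (if pvCell l r q = "O" then (l.length : Int) - r else 0) := by
  exact calc_py_enum_score id (fun x => (l.length : Int) - x) l a

-- B's inner per-column loop over the grid = the settled score of that column
theorem calc_py_bcol_grid (data : List (List String)) (j : Nat) (s : Int) :
    ((PySem.List.enumerate data).foldl
      (fun (p : Int × Int) ri =>
        if ri.2.getD j "" = "O" then (p.1 + ((data.length : Int) - p.2), p.2 + 1)
        else if ri.2.getD j "" = "." then p
        else (p.1, ri.1 + 1)) (s, 0)).1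
    = s + pvColScore data.length (pvSettle (pvCol data j)).1 := by
  have hmap : PySem.List.enumerate (pvCol data j) 0
      = (PySem.List.enumerate data 0).map (fun p => (p.1, p.2.getD j "")) := by
    unfold pvCol
    rw [calc_py_enum_map]
  have h := calc_py_bcol data.length (pvCol data j) s
  rw [hmap, List.foldl_map] at h
  exact congrArg Prod.fst h

-- B = the per-column settled scores, summed
theorem calc_py_alt_eq (data : List (List String)) :
    calc_py_alt data
    = ∑ j ∈ Finset.range data.headI.length,
        pvColScore data.length (pvSettle (pvCol data j)).1 := by
  simp only [calc_py_alt]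
  have hfun : (fun (score : Int) (j : Nat) =>
      ((PySem.List.enumerate data).foldl
        (fun (p : Int × Int) ri =>
          if ri.2.getD j "" = "O" then (p.1 + ((data.length : Int) - p.2), p.2 + 1)
          else if ri.2.getD j "" = "." then p
          else (p.1, ri.1 + 1))
        (score, 0)).1)
      = fun (score : Int) (j : Nat) =>
          score + pvColScore data.length (pvSettle (pvCol data j)).1 := by
    funext s j
    exact calc_py_bcol_grid data j s
  rw [hfun, PySem.List.foldl_add, calc_py_sum_map_range]
  simp

-- the first-w-columns part of A's score equals the per-column settled scores
theorem calc_py_colpart (data : List (List String)) (hPre : Pre_calc_py data) :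
    ∑ r ∈ Finset.range data.length, ∑ q ∈ Finset.range data.headI.length,
      (if pvCell (pvRollA data) r q = "O" then (data.length : Int) - r else 0)
    = ∑ j ∈ Finset.range data.headI.length,
        pvColScore data.length (pvSettle (pvCol data j)).1 := by
  obtain ⟨hGlen, hGrow, hGcell⟩ := calc_py_Q_roll data hPre
  rw [Finset.sum_comm]
  apply Finset.sum_congr rfl
  intro j hj
  rw [Finset.mem_range] at hj
  unfold pvColScore
  have hSlen : (pvSettle (pvCol data j)).1.length = data.length := by
    rw [calc_py_settle_len]; simp [pvCol]
  rw [hSlen]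
  apply Finset.sum_congr rfl
  intro r hr
  rw [Finset.mem_range] at hr
  have h1 := hGcell r j
  rw [if_pos (show j < data.headI.length ∧ r ≤ data.length ∧ (j < 0 ∨ r < data.length) from
      ⟨hj, by omega, Or.inr hr⟩),
    if_neg (show ¬ j < 0 by omega),
    List.take_of_length_le (by simp [pvCol])] at h1
  rw [h1]

-- the decomposition: A's value = B's value + the overhang score
theorem calc_py_decomp (data : List (List String)) (hPre : Pre_calc_py data) :
    calc_py data = calc_py_alt data + pvTail data := by
  obtain ⟨hGlen, hGrow, hGcell⟩ := calc_py_Q_roll data hPre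
  simp only [calc_py]
  rw [calc_py_scoreA, hGlen, calc_py_alt_eq]
  have hsum : ∀ r ∈ Finset.range data.length,
      (∑ q ∈ Finset.range (((pvRollA data).getD r []).length),
        (if pvCell (pvRollA data) r q = "O" then (data.length : Int) - r else 0))
      = (∑ q ∈ Finset.range data.headI.length,
          (if pvCell (pvRollA data) r q = "O" then (data.length : Int) - r else 0))
        + ∑ q ∈ Finset.range ((data.getD r []).drop data.headI.length).length,
            (if ((data.getD r []).drop data.headI.length).getD q "" = "O"
              then (data.length : Int) - r else 0) := by
    intro r hr
    rw [Finset.mem_range] at hr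
    have hL : ((pvRollA data).getD r []).length = (data.getD r []).length := hGrow r
    have hsplitlen : (data.getD r []).length
        = data.headI.length + ((data.getD r []).length - data.headI.length) := by
      have := calc_py_pre_rows data hPre r hr
      omega
    rw [hL, hsplitlen, Finset.sum_range_add]
    congr 1
    have hdl : ((data.getD r []).drop data.headI.length).length
        = (data.getD r []).length - data.headI.length := List.length_drop
    rw [hdl]
    apply Finset.sum_congr rfl
    intro q hq
    have hcell : pvCell (pvRollA data) r (data.headI.length + q)
        = pvCell data r (data.headI.length + q) := by
      have h1 := hGcell r (data.headI.length + q)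
      rw [if_neg (by omega)] at h1
      exact h1
    have hdropget : ((data.getD r []).drop data.headI.length).getD q ""
        = pvCell data r (data.headI.length + q) := by
      unfold pvCell
      rw [List.getD_eq_getElem?_getD, List.getElem?_drop, ← List.getD_eq_getElem?_getD]
    rw [hcell, hdropget]
  rw [Finset.sum_congr rfl hsum, Finset.sum_add_distrib, calc_py_colpart data hPre]
  unfold pvTail
  ring

-- without an overhang rock, the overhang score is zero
theorem calc_py_tail_zero (data : List (List String)) (hD : ¬ D_calc_py data) :
    pvTail data = 0 := by
  unfold pvTail
  apply Finset.sum_eq_zero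
  intro r hr
  rw [Finset.mem_range] at hr
  apply Finset.sum_eq_zero
  intro q hq
  rw [Finset.mem_range] at hq
  rw [if_neg]
  intro hO
  apply hD
  refine ⟨data.getD r [], ?_, ?_⟩
  · rw [List.getD_eq_getElem?_getD, List.getElem?_eq_getElem hr]
    simp only [Option.getD_some]
    exact List.getElem_mem hr
  · have hm : ((data.getD r []).drop data.headI.length)[q]
        ∈ (data.getD r []).drop data.headI.length := List.getElem_mem hq
    have he : ((data.getD r []).drop data.headI.length).getD q ""
        = ((data.getD r []).drop data.headI.length)[q] := by
      have hq' := hq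
      simp only [List.getD_eq_getElem?_getD] at hq' ⊢
      rw [List.getElem?_eq_getElem hq']
      simp
    rw [← he, hO] at hm
    exact hm

-- with an overhang rock, the overhang score is at least 1
theorem calc_py_tail_pos (data : List (List String)) (hD : D_calc_py data) :
    1 ≤ pvTail data := by
  obtain ⟨row, hrow, hO⟩ := hD
  obtain ⟨r, hr, hrget⟩ := List.mem_iff_getElem.mp hrow
  obtain ⟨q, hq, hqget⟩ := List.mem_iff_getElem.mp hO
  have hterm : ∀ s ∈ Finset.range data.length, (0 : Int) ≤
      ∑ q ∈ Finset.range ((data.getD s []).drop data.headI.length).length,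
        (if ((data.getD s []).drop data.headI.length).getD q "" = "O"
          then (data.length : Int) - s else 0) := by
    intro s hs
    rw [Finset.mem_range] at hs
    apply Finset.sum_nonneg
    intro t _
    split_ifs with h
    · omega
    · omega
  have hdgd : data.getD r [] = row := by
    rw [List.getD_eq_getElem?_getD, List.getElem?_eq_getElem hr, hrget]
    simp only [Option.getD_some]
  have hinner : (1 : Int) ≤
      ∑ t ∈ Finset.range ((data.getD r []).drop data.headI.length).length,
        (if ((data.getD r []).drop data.headI.length).getD t "" = "O"
          then (data.length : Int) - r else 0) := by
    have hcellq : ((data.getD r []).drop data.headI.length).getD q "" = "O" := by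
      rw [hdgd, List.getD_eq_getElem?_getD, List.getElem?_eq_getElem hq, hqget]
      simp only [Option.getD_some]
    have hone : (1 : Int) ≤ (if ((data.getD r []).drop data.headI.length).getD q "" = "O"
        then (data.length : Int) - r else 0) := by
      rw [if_pos hcellq]
      omega
    calc (1 : Int)
        ≤ (if ((data.getD r []).drop data.headI.length).getD q "" = "O"
            then (data.length : Int) - r else 0) := hone
      _ ≤ _ := by
          apply Finset.single_le_sum (f := fun t =>
            (if ((data.getD r []).drop data.headI.length).getD t "" = "O"
              then (data.length : Int) - r else 0))
          · intro t _
            split_ifs with h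
            · omega
            · omega
          · rw [Finset.mem_range, hdgd]
            exact hq
  unfold pvTail
  calc (1 : Int)
      ≤ ∑ t ∈ Finset.range ((data.getD r []).drop data.headI.length).length,
          (if ((data.getD r []).drop data.headI.length).getD t "" = "O"
            then (data.length : Int) - r else 0) := hinner
    _ ≤ _ := Finset.single_le_sum (f := fun s =>
          ∑ t ∈ Finset.range ((data.getD s []).drop data.headI.length).length,
            (if ((data.getD s []).drop data.headI.length).getD t "" = "O"
              then (data.length : Int) - s else 0))
          hterm (Finset.mem_range.mpr hr)

-- ===== VERDICT (by name: the statements are the Claim_ definitions above) =====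
theorem calc_py_spec : Claim_unchanged_calc_py := by
  unfold Claim_unchanged_calc_py
  intro data _hDom hPre
  unfold Spec_calc_py
  intro hD
  rw [calc_py_decomp data hPre, calc_py_tail_zero data hD, add_zero]

theorem calc_py_changed : Claim_changed_calc_py := by
  unfold Claim_changed_calc_py; decide

theorem calc_py_tight : Claim_exact_calc_py := by
  unfold Claim_exact_calc_py
  intro data _hDom hPre hD
  rw [calc_py_decomp data hPre]
  have := calc_py_tail_pos data hD
  omega
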